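-- pv_equiv track=rewrite | github.com/uk1107/uk1107 | 07-extra.py | calcmax
-- ===== SOURCE A (Python) =====
-- def cumsum(x):
--     result = [None] * (len(x)+1)
--     result[0] = 0
--     for i in range(len(x)):
--         result[i+1] = result[i] + x[i]
--     return result
--
-- def calcmax(length,numarr,betarr):
--     dp =  [[0 for _ in range(length)]for _ in range(length)]
--     dp2 =  [[0 for _ in range(length)]for _ in range(length)]
--     cumarr = cumsum(numarr)
--
--     for i in range(length):
--         for j in range(length):
--             dp[j][i] = cumarr[j+1]-cumarr[i]
--             if i == 0:
--                 dp2[j][i] = 0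
--             else:
--                 k = 0
--                 c = []
--                 while k < i:
--                     if dp[i-1][k] != dp[j][i]:
--                         c.append(dp2[i-1][k])
--                     k += 1
--                 if not c:
--                     if i == j:
--                         dp[j][i] += dp[j-1][i-1]
--                 else:
--                     dp2[j][i] += max(c) + betarr[i-1]
--
--     maxnum = max(dp2[length-1])
--     return maxnum
-- ===== SOURCE B (Python) =====
-- def calcmax(length, numarr, betarr):
--     # Column-wise DP: for each column i keep only the previous dp row's
--     # (key, value) pairs summarised as a streamed top-2 structure
--     # (best key k1 with max value m1, and m2 = best value among other keys),
--     # so each "max excluding one key" query is O(1) instead of an O(n) scan.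
--     n = length
--     cum = [0]
--     for x in numarr[:n]:
--         cum.append(cum[-1] + x)
--     dp2cols = []   # dp2cols[i][j] == dp2[j][i] of the table formulation
--     diag = []      # diag[i] == dp[i][i] (the only mutated dp entries)
--     for i in range(n):
--         base = cum[i + 1] - cum[i]
--         if i == 0:
--             dp2cols.append([0] * n)
--             diag.append(base)
--             continue
--         k1 = m1 = m2 = None
--         for k in range(i):
--             key = diag[i - 1] if k == i - 1 else cum[i] - cum[k]
--             val = dp2cols[k][i - 1]
--             if k1 is None:
--                 k1, m1 = key, val
--             elif key == k1:
--                 if val > m1: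
--                     m1 = val
--             elif val > m1:
--                 m2 = m1 if m2 is None else max(m2, m1)
--                 k1, m1 = key, val
--             else:
--                 m2 = val if m2 is None else max(m2, val)
--         b = betarr[i - 1]
--         col = []
--         for j in range(n):
--             t = cum[j + 1] - cum[i]
--             if t == k1:
--                 col.append(0 if m2 is None else m2 + b)
--             else:
--                 col.append(m1 + b)
--         dp2cols.append(col)
--         diag.append(base + diag[i - 1] if (base == k1 and m2 is None) else base)
--     return max(c[n - 1] for c in dp2cols)
-- ===== Notes on version B (the rewrite author's own statement) =====
-- stated objective: faster
-- what changed: Instead of materialising both n-by-n tables and rescanning the previous dp row for every cell (A's inner while loop), B works column by column and summarises the previous row's (key,value) pairs once per column into a streamed top-2 structure (best key with its maximum, plus the best value under any other key), answering every 'max excluding one key' query in O(1).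
-- outside the precondition, e.g. on calcmax(2, [0, 0], []): A returns 0, B raises IndexError; on calcmax(3, [0, 0, 0], []): A returns 0, B raises IndexError
import Mathlib
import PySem

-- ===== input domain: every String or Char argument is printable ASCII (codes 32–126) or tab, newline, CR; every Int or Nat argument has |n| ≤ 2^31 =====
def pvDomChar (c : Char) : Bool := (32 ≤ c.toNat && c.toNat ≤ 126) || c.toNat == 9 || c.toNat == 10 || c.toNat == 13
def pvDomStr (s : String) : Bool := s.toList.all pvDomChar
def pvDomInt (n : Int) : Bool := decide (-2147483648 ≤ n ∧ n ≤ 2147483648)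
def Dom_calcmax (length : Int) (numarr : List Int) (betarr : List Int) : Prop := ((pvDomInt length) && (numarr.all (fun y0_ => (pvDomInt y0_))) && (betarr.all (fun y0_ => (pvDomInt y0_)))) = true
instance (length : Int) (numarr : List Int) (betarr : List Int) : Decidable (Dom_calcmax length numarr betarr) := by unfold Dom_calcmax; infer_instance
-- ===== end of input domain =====

-- B replaces A's per-cell rescans of the previous dp row by one per-column top-2 summary
-- (objective: faster, O(n^2) instead of O(n^3)); equal on all inputs where A returns,
-- except that Pre_ also excludes short betarr, where A's completion is a data-dependent accident.

-- ===== PORT A =====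
-- table cell access/update: dp[j][i]; every index used under Pre_ is in range, so getD is exact
def pvGet2 (m : List (List Int)) (j i : Nat) : Int := (m.getD j []).getD i 0
def pvSet2 (m : List (List Int)) (j i : Nat) (v : Int) : List (List Int) :=
  m.set j ((m.getD j []).set i v)

-- cumsum: [None]*(n+1) with result[0]=0 → replicate 0 (every other cell is written before read)
def cumsumA (x : List Int) : List Int :=
  (List.range x.length).foldl (fun r i => r.set (i+1) (r.getD i 0 + x.getD i 0))
    (List.replicate (x.length + 1) 0)

-- body of A's inner loop over j (one cell of column i); the while-loop building c is the foldl over range i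
def pvABody (cumarr betarr : List Int) (i : Nat)
    (st : List (List Int) × List (List Int)) (j : Nat) : List (List Int) × List (List Int) :=
  let dp := st.1
  let dp2 := st.2
  let v := cumarr.getD (j+1) 0 - cumarr.getD i 0
  let dp := pvSet2 dp j i v
  if i = 0 then (dp, pvSet2 dp2 j i 0)
  else
    let c := (List.range i).foldl
      (fun c k => if pvGet2 dp (i-1) k ≠ v then c ++ [pvGet2 dp2 (i-1) k] else c) []
    if c = [] then
      if i = j then (pvSet2 dp j i (pvGet2 dp j i + pvGet2 dp (j-1) (i-1)), dp2)
      else (dp, dp2)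
    else
      (dp, pvSet2 dp2 j i (pvGet2 dp2 j i +
            ((PySem.List.max? c (fun y => y)).getD 0 + betarr.getD (i-1) 0)))

def innerA (n : Nat) (cumarr betarr : List Int) (i : Nat)
    (st : List (List Int) × List (List Int)) : List (List Int) × List (List Int) :=
  (List.range n).foldl (pvABody cumarr betarr i) st

def calcmax (length : Int) (numarr : List Int) (betarr : List Int) : Int :=
  let n := length.toNat
  let cumarr := cumsumA numarr
  let st := (List.range n).foldl (fun st i => innerA n cumarr betarr i st)
      (List.replicate n (List.replicate n 0), List.replicate n (List.replicate n 0))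
  (PySem.List.max? (st.2.getD (n-1) []) (fun y => y)).getD 0   -- max(dp2[length-1]); nonempty under Pre_

-- ===== PORT B =====
-- streamed top-2 over (key, val) pairs: k1 = key of the running maximum m1,
-- m2 = best value seen under any key ≠ k1 (None until one exists)
def pvTop2Step (s : Option (Int × Int) × Option Int) (key val : Int) :
    Option (Int × Int) × Option Int :=
  match s with
  | (none, m2) => (some (key, val), m2)
  | (some (k1, m1), m2) =>
    if key = k1 then (some (k1, if m1 < val then val else m1), m2)
    else if m1 < val then
      (some (key, val), some (match m2 with | none => m1 | some m => max m m1))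
    else
      (some (k1, m1), some (match m2 with | none => val | some m => max m val))

-- body of B's loop over columns i
def pvColB (n : Nat) (cum betarr : List Int) (i : Nat)
    (st : List (List Int) × List Int) : List (List Int) × List Int :=
  let dp2cols := st.1
  let diag := st.2
  let base := cum.getD (i+1) 0 - cum.getD i 0
  if i = 0 then (dp2cols ++ [List.replicate n 0], diag ++ [base])
  else
    let t2 := (List.range i).foldl
      (fun s k => pvTop2Step s
          (if k = i-1 then diag.getD (i-1) 0 else cum.getD i 0 - cum.getD k 0)
          ((dp2cols.getD k []).getD (i-1) 0)) (none, none)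
    let b := betarr.getD (i-1) 0
    let col := (List.range n).map (fun j =>
      let t := cum.getD (j+1) 0 - cum.getD i 0
      match t2 with
      | (some (k1, m1), m2) => if t = k1 then (match m2 with | none => 0 | some m => m + b) else m1 + b
      | (none, _) => 0)
    let diagNew := match t2 with
      | (some (k1, _), none) => if base = k1 then base + diag.getD (i-1) 0 else base
      | _ => base
    (dp2cols ++ [col], diag ++ [diagNew])

def calcmax_alt (length : Int) (numarr : List Int) (betarr : List Int) : Int :=
  let n := length.toNat
  let cum := (PySem.List.slice numarr none (some length)).foldl
      (fun c x => c ++ [c.getLastD 0 + x]) [(0 : Int)]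
  let st := (List.range n).foldl (fun st i => pvColB n cum betarr i st) ([], [])
  (PySem.List.max? (st.1.map (fun c => c.getD (n-1) 0)) (fun y => y)).getD 0

-- ===== PRECONDITION & SPEC =====
-- Pre_ excludes exactly: length < 1 or numarr shorter than length (A raises IndexError there), and
-- betarr shorter than length-1, where A's occasional completion is a data-dependent accident
-- (betarr[i-1] is only read when an exclusion list happens to be nonempty) and B raises IndexError.
def Pre_calcmax (length : Int) (numarr : List Int) (betarr : List Int) : Prop :=
  1 ≤ length ∧ length ≤ (numarr.length : Int) ∧ length - 1 ≤ (betarr.length : Int)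
instance (length : Int) (numarr : List Int) (betarr : List Int) : Decidable (Pre_calcmax length numarr betarr) := by unfold Pre_calcmax; infer_instance
def pvWitness_calcmax : Int × List Int × List Int := (2, [1, 2], [3])

def Spec_calcmax (length : Int) (numarr : List Int) (betarr : List Int) (out : Int) : Prop := out = calcmax_alt length numarr betarr
instance (length : Int) (numarr : List Int) (betarr : List Int) (out : Int) : Decidable (Spec_calcmax length numarr betarr out) := by unfold Spec_calcmax; infer_instance

-- ===== CLAIM (what is proved, stated in full; the proofs are below) =====
def Claim_equal_calcmax : Prop := ∀ (length : Int) (numarr : List Int) (betarr : List Int), Dom_calcmax length numarr betarr → Pre_calcmax length numarr betarr → Spec_calcmax length numarr betarr (calcmax length numarr betarr)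

-- ===== LEMMAS AND PROOFS =====
def pvGood (s : Option (Int × Int) × Option Int) (L : List (Int × Int)) : Prop :=
  match s with
  | (none, m2) => L = [] ∧ m2 = none
  | (some (k1, m1), m2) =>
    (k1, m1) ∈ L ∧ (∀ p ∈ L, p.2 ≤ m1) ∧
    (match m2 with
     | none => ∀ p ∈ L, p.1 = k1
     | some m2v => (∃ p ∈ L, p.1 ≠ k1 ∧ p.2 = m2v) ∧ (∀ p ∈ L, p.1 ≠ k1 → p.2 ≤ m2v))
theorem pvMaxId_eq_some (l : List Int) (m : Int) (hm : m ∈ l) (hub : ∀ y ∈ l, y ≤ m) :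
    PySem.List.max? l (fun y => y) = some m := by
  cases h : PySem.List.max? l (fun y => y) with
  | none => rw [PySem.List.max?_eq_none_iff] at h; subst h; simp at hm
  | some m' =>
    have h1 : m' ∈ l := PySem.List.max?_mem h
    have h2 : m ≤ m' := by simpa using PySem.List.max?_isMax h m hm
    exact congrArg some (le_antisymm (hub m' h1) h2)

theorem pvGood_step (s : Option (Int × Int) × Option Int) (L : List (Int × Int)) (key val : Int)
    (h : pvGood s L) : pvGood (pvTop2Step s key val) (L ++ [(key, val)]) := by
  obtain ⟨s1, m2⟩ := s
  cases s1 with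
  | none =>
    obtain ⟨rfl, rfl⟩ := h
    simp [pvTop2Step, pvGood]
  | some p =>
    obtain ⟨k1, m1⟩ := p
    obtain ⟨hmem, hub, hm2⟩ := h
    dsimp only [pvTop2Step]
    by_cases hk : key = k1
    · subst hk
      rw [if_pos rfl]
      refine ⟨?_, ?_, ?_⟩
      · by_cases hv : m1 < val
        · simp [hv]
        · simp [hv, List.mem_append, hmem]
      · intro p hp
        rcases List.mem_append.mp hp with hp | hp
        · have := hub p hp; split <;> omega
        · simp at hp; subst hp; simp; split <;> omega
      · cases m2 with
        | none =>
          intro p hp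
          rcases List.mem_append.mp hp with hp | hp
          · exact hm2 p hp
          · simp at hp; subst hp; rfl
        | some m2v =>
          obtain ⟨⟨q, hq, hq1, hq2⟩, hub2⟩ := hm2
          refine ⟨⟨q, List.mem_append_left _ hq, hq1, hq2⟩, ?_⟩
          intro p hp hp1
          rcases List.mem_append.mp hp with hp | hp
          · exact hub2 p hp hp1
          · simp at hp; subst hp; simp at hp1
    · by_cases hv : m1 < val
      · simp only [if_neg hk, if_pos hv]
        refine ⟨List.mem_append_right _ (by simp), ?_, ?_⟩
        · intro p hp
          rcases List.mem_append.mp hp with hp | hp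
          · have := hub p hp; omega
          · simp at hp; subst hp; simp
        · -- m2' = some (max-with m1)
          have hm2le : ∀ m2v, m2 = some m2v → m2v ≤ m1 := by
            intro m2v hm
            subst hm
            obtain ⟨⟨q, hq, hq1, hq2⟩, _⟩ := hm2
            have := hub q hq; omega
          cases m2 with
          | none =>
            refine ⟨⟨(k1, m1), List.mem_append_left _ hmem, ?_, rfl⟩, ?_⟩
            · simpa using (Ne.symm hk)
            · intro p hp hp1
              rcases List.mem_append.mp hp with hp | hp
              · exact hub p hp
              · simp at hp; subst hp; simp at hp1
          | some m2v =>
            have hle := hm2le m2v rfl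
            have hmax : max m2v m1 = m1 := by omega
            refine ⟨⟨(k1, m1), List.mem_append_left _ hmem, by simpa using (Ne.symm hk), by simp [hmax]⟩, ?_⟩
            intro p hp hp1
            rcases List.mem_append.mp hp with hp | hp
            · have := hub p hp; simp; omega
            · simp at hp; subst hp; simp at hp1
      · simp only [if_neg hk, if_neg hv]
        refine ⟨List.mem_append_left _ hmem, ?_, ?_⟩
        · intro p hp
          rcases List.mem_append.mp hp with hp | hp
          · exact hub p hp
          · simp at hp; subst hp; omega
        · cases m2 with
          | none =>
            refine ⟨⟨(key, val), List.mem_append_right _ (by simp), by simpa using hk, rfl⟩, ?_⟩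
            intro p hp hp1
            rcases List.mem_append.mp hp with hp | hp
            · exact absurd (hm2 p hp) hp1
            · simp at hp; subst hp; simp
          | some m2v =>
            obtain ⟨⟨q, hq, hq1, hq2⟩, hub2⟩ := hm2
            refine ⟨?_, ?_⟩
            · by_cases hvm : val ≤ m2v
              · exact ⟨q, List.mem_append_left _ hq, hq1, by simp; omega⟩
              · exact ⟨(key, val), List.mem_append_right _ (by simp), by simpa using hk, by simp; omega⟩
            · intro p hp hp1
              rcases List.mem_append.mp hp with hp | hp
              · have := hub2 p hp hp1; simp; omega
              · simp at hp; subst hp; simp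
theorem pvGood_fold (keyF valF : Nat → Int) (ks : List Nat) :
    ∀ s L, pvGood s L →
      pvGood (ks.foldl (fun s k => pvTop2Step s (keyF k) (valF k)) s)
        (L ++ ks.map (fun k => (keyF k, valF k))) := by
  induction ks with
  | nil => intro s L h; simpa using h
  | cons k t ih =>
    intro s L h
    simp only [List.foldl_cons, List.map_cons]
    have := ih (pvTop2Step s (keyF k) (valF k)) (L ++ [(keyF k, valF k)]) (pvGood_step s L _ _ h)
    simpa using this

theorem pvGood_query (s : Option (Int × Int) × Option Int) (L : List (Int × Int))
    (h : pvGood s L) (t : Int) :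
    (match s with
     | (some (k1, m1), m2) => if t = k1 then m2 else some m1
     | (none, _) => none)
    = PySem.List.max? ((L.filter (fun p => decide (¬ p.1 = t))).map (fun p => p.2)) (fun y => y) := by
  obtain ⟨s1, m2⟩ := s
  cases s1 with
  | none =>
    obtain ⟨rfl, _⟩ := h
    simp only [List.filter_nil, List.map_nil]
    exact ((PySem.List.max?_eq_none_iff _ _).mpr rfl).symm
  | some p =>
    obtain ⟨k1, m1⟩ := p
    obtain ⟨hmem, hub, hm2⟩ := h
    simp only []
    by_cases ht : t = k1
    · subst ht
      rw [if_pos rfl]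
      cases m2 with
      | none =>
        have : L.filter (fun p => decide (¬ p.1 = t)) = [] := by
          rw [List.filter_eq_nil_iff]
          intro p hp
          simp [hm2 p hp]
        rw [this]
        simp only [List.map_nil]
        exact ((PySem.List.max?_eq_none_iff _ _).mpr rfl).symm
      | some m2v =>
        obtain ⟨⟨q, hq, hq1, hq2⟩, hub2⟩ := hm2
        refine (pvMaxId_eq_some _ _ ?_ ?_).symm
        · exact List.mem_map.mpr ⟨q, List.mem_filter.mpr ⟨hq, by simpa using hq1⟩, hq2⟩
        · intro y hy
          obtain ⟨p, hp, rfl⟩ := List.mem_map.mp hy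
          obtain ⟨hpL, hpt⟩ := List.mem_filter.mp hp
          exact hub2 p hpL (by simpa using hpt)
    · rw [if_neg ht]
      refine (pvMaxId_eq_some _ _ ?_ ?_).symm
      · exact List.mem_map.mpr ⟨(k1, m1), List.mem_filter.mpr ⟨hmem, by simpa using (fun hh => ht hh.symm)⟩, rfl⟩
      · intro y hy
        obtain ⟨p, hp, rfl⟩ := List.mem_map.mp hy
        exact hub p (List.mem_filter.mp hp).1
def pvC (numarr : List Int) (m : Nat) : Int := (numarr.take m).sum
def pvKey (C : Nat → Int) (diag : List Int) (i k : Nat) : Int :=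
  if k = i - 1 then diag.getD (i-1) 0 else C i - C k
def pvVal (cols : List (List Int)) (i k : Nat) : Int := (cols.getD k []).getD (i-1) 0
def pvQ (C : Nat → Int) (cols : List (List Int)) (diag : List Int) (i : Nat) (t : Int) : Option Int :=
  PySem.List.max?
    (((List.range i).filter (fun k => decide (¬ pvKey C diag i k = t))).map (pvVal cols i))
    (fun y => y)
def pvColV (C : Nat → Int) (betarr : List Int) (cols : List (List Int)) (diag : List Int)
    (i j : Nat) : Int :=
  match pvQ C cols diag i (C (j+1) - C i) with
  | none => 0
  | some m => m + betarr.getD (i-1) 0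
def pvDiagV (C : Nat → Int) (cols : List (List Int)) (diag : List Int) (i : Nat) : Int :=
  if pvQ C cols diag i (C (i+1) - C i) = none then (C (i+1) - C i) + diag.getD (i-1) 0
  else C (i+1) - C i
theorem pvColB_spec (n : Nat) (C : Nat → Int) (cum betarr : List Int)
    (cols : List (List Int)) (diag : List Int) (i : Nat) (h1 : 1 ≤ i) (hin : i < n)
    (hcum : ∀ m ≤ n, cum.getD m 0 = C m) :
    pvColB n cum betarr i (cols, diag) =
      (cols ++ [(List.range n).map (fun j => pvColV C betarr cols diag i j)],
       diag ++ [pvDiagV C cols diag i]) := by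
  unfold pvColB
  rw [if_neg (by omega)]
  have hbody : ∀ (s : Option (Int × Int) × Option Int), ∀ k ∈ List.range i,
      pvTop2Step s (if k = i-1 then diag.getD (i-1) 0 else cum.getD i 0 - cum.getD k 0)
          ((cols.getD k []).getD (i-1) 0)
        = pvTop2Step s (pvKey C diag i k) (pvVal cols i k) := by
    intro s k hk
    rw [List.mem_range] at hk
    unfold pvKey pvVal
    rcases eq_or_ne k (i-1) with rfl | hne
    · rw [if_pos rfl, if_pos rfl]
    · rw [if_neg hne, if_neg hne, hcum i (by omega), hcum k (by omega)]
  have hfold : (List.range i).foldl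
      (fun s k => pvTop2Step s
        (if k = i-1 then diag.getD (i-1) 0 else cum.getD i 0 - cum.getD k 0)
        ((cols.getD k []).getD (i-1) 0)) (none, none)
      = (List.range i).foldl
        (fun s k => pvTop2Step s (pvKey C diag i k) (pvVal cols i k)) (none, none) := by
    apply List.foldl_ext
    intro b k hk
    exact hbody b k hk
  have hgood : pvGood ((List.range i).foldl
      (fun s k => pvTop2Step s (pvKey C diag i k) (pvVal cols i k)) (none, none))
      ((List.range i).map (fun k => (pvKey C diag i k, pvVal cols i k))) := by
    have := pvGood_fold (pvKey C diag i) (pvVal cols i) (List.range i) (none, none) [] (by exact ⟨rfl, rfl⟩)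
    simpa using this
  rw [hfold]
  rcases hEf : (List.range i).foldl
      (fun s k => pvTop2Step s (pvKey C diag i k) (pvVal cols i k)) (none, none) with ⟨s1, m2⟩
  rw [hEf] at hgood
  cases s1 with
  | none =>
    exfalso
    obtain ⟨hnil, _⟩ := hgood
    have : (i : Nat) ≠ 0 := by omega
    simp [List.range_eq_nil] at hnil
    omega
  | some p =>
    obtain ⟨k1, m1⟩ := p
    have hq : ∀ t, (if t = k1 then m2 else some m1) = pvQ C cols diag i t := by
      intro t
      have := pvGood_query (some (k1, m1), m2)
        ((List.range i).map (fun k => (pvKey C diag i k, pvVal cols i k))) hgood t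
      simp only [] at this
      rw [this]
      unfold pvQ
      rw [List.filter_map, List.map_map]
      rfl
    dsimp only
    rw [Prod.mk.injEq]
    refine ⟨?_, ?_⟩
    · -- columns component
      congr 1
      congr 1
      apply List.map_congr_left
      intro j hj
      rw [List.mem_range] at hj
      rw [hcum (j+1) (by omega), hcum i (by omega)]
      unfold pvColV
      rcases eq_or_ne (C (j+1) - C i) k1 with he | hne
      · rw [if_pos he, ← hq (C (j+1) - C i), if_pos he]
      · rw [if_neg hne, ← hq (C (j+1) - C i), if_neg hne]
    · -- diagonal component
      congr 1
      congr 1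
      rw [hcum (i+1) (by omega), hcum i (by omega)]
      unfold pvDiagV
      rw [← hq (C (i+1) - C i)]
      cases m2 with
      | none =>
        rcases eq_or_ne (C (i+1) - C i) k1 with he | hne
        · rw [if_pos he]
          simp [he]
        · rw [if_neg hne]
          simp [hne]
      | some m2v =>
        rcases eq_or_ne (C (i+1) - C i) k1 with he | hne
        · simp [he]
        · simp [hne]
theorem pvGetD_set_self' {α : Type} (l : List α) (j : Nat) (r d : α) (hj : j < l.length) :
    (l.set j r).getD j d = r := by
  rw [List.getD_eq_getElem?_getD, List.getElem?_set_self hj]; rfl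
theorem pvGetD_set_ne' {α : Type} (l : List α) (j j' : Nat) (r d : α) (h : j' ≠ j) :
    (l.set j r).getD j' d = l.getD j' d := by
  rw [List.getD_eq_getElem?_getD, List.getElem?_set_ne (by omega), ← List.getD_eq_getElem?_getD]
theorem pvSet2_length (m : List (List Int)) (j i : Nat) (v : Int) :
    (pvSet2 m j i v).length = m.length := by simp [pvSet2]
theorem pvSet2_rowlen (m : List (List Int)) (j i : Nat) (v : Int) (j' : Nat) :
    ((pvSet2 m j i v).getD j' []).length = (m.getD j' []).length := by
  unfold pvSet2
  rcases eq_or_ne j' j with rfl | hne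
  · by_cases hj : j' < m.length
    · rw [pvGetD_set_self' _ _ _ _ hj]; simp
    · rw [List.set_eq_of_length_le (by omega)]
  · rw [pvGetD_set_ne' _ _ _ _ _ hne]
theorem pvGet2_set2_self (m : List (List Int)) (j i : Nat) (v : Int)
    (hj : j < m.length) (hi : i < (m.getD j []).length) :
    pvGet2 (pvSet2 m j i v) j i = v := by
  unfold pvGet2 pvSet2
  rw [pvGetD_set_self' _ _ _ _ hj, pvGetD_set_self' _ _ _ _ hi]
theorem pvGet2_set2_ne (m : List (List Int)) (j i : Nat) (v : Int) (j' i' : Nat)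
    (h : j' ≠ j ∨ i' ≠ i) :
    pvGet2 (pvSet2 m j i v) j' i' = pvGet2 m j' i' := by
  unfold pvGet2 pvSet2
  rcases eq_or_ne j' j with rfl | hne
  · rcases h with h | h
    · omega
    · by_cases hj : j' < m.length
      · rw [pvGetD_set_self' _ _ _ _ hj, pvGetD_set_ne' _ _ _ _ _ h]
      · rw [List.set_eq_of_length_le (by omega)]
  · rw [pvGetD_set_ne' _ _ _ _ _ hne]


theorem pvC_succ (x : List Int) (m : Nat) (hm : m < x.length) :
    pvC x (m+1) = pvC x m + x.getD m 0 := by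
  unfold pvC
  rw [List.sum_take_succ _ _ hm]
  simp [List.getD_eq_getElem?_getD, List.getElem?_eq_getElem hm]

theorem cumB_aux (l : List Int) (acc : List Int) (a : Int) :
    l.foldl (fun c y => c ++ [c.getLastD 0 + y]) (acc ++ [a])
      = acc ++ l.foldl (fun c y => c ++ [c.getLastD 0 + y]) [a] := by
  induction l generalizing acc a with
  | nil => simp
  | cons x t ih =>
    simp only [List.foldl_cons]
    have h1 : (acc ++ [a]).getLastD 0 = a := by simp
    have h2 : ([a] : List Int).getLastD 0 = a := by simp
    rw [h1, h2, List.append_assoc, ← List.append_assoc acc [a] [a+x]]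
    rw [ih (acc ++ [a]) (a + x)]
    rw [show ([a] : List Int) ++ [a + x] = [a, a+x] from rfl]
    have := ih [a] (a + x)
    rw [show ([a] : List Int) ++ [a + x] = [a, a+x] from rfl] at this
    rw [this]
    simp

theorem cumB_getD' (l : List Int) : ∀ (s : Int) (m : Nat), m ≤ l.length →
    (l.foldl (fun c y => c ++ [c.getLastD 0 + y]) [s]).getD m 0 = s + (l.take m).sum := by
  induction l with
  | nil => intro s m hm; simp at hm; subst hm; simp
  | cons x t ih =>
    intro s m hm
    have step : (x :: t).foldl (fun c y => c ++ [c.getLastD 0 + y]) [s]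
        = [s] ++ t.foldl (fun c y => c ++ [c.getLastD 0 + y]) [s + x] := by
      simp only [List.foldl_cons]
      have h2 : ([s] : List Int).getLastD 0 = s := by simp
      rw [h2]
      have := cumB_aux t [s] (s + x)
      rw [show ([s] : List Int) ++ [s + x] = [s, s+x] from rfl] at this
      exact this
    rw [step]
    cases m with
    | zero => simp
    | succ m' =>
      simp only [List.singleton_append, List.getD_cons_succ]
      rw [ih (s + x) m' (by simpa using hm)]
      simp [List.take_succ_cons]
      ring

theorem cumsumA_inv (x : List Int) : ∀ t, t ≤ x.length →
    ((List.range t).foldl (fun r i => r.set (i+1) (r.getD i 0 + x.getD i 0))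
      (List.replicate (x.length + 1) 0)).length = x.length + 1 ∧
    ∀ m ≤ t, ((List.range t).foldl (fun r i => r.set (i+1) (r.getD i 0 + x.getD i 0))
      (List.replicate (x.length + 1) 0)).getD m 0 = pvC x m := by
  intro t
  induction t with
  | zero =>
    intro _
    constructor
    · simp
    · intro m hm; simp at hm; subst hm; simp [pvC]
  | succ t ih =>
    intro ht
    obtain ⟨ihl, ihv⟩ := ih (by omega)
    rw [List.range_succ, List.foldl_append, List.foldl_cons, List.foldl_nil]
    constructor
    · rw [List.length_set, ihl]
    · intro m hm
      rcases eq_or_ne m (t+1) with rfl | hne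
      · rw [pvGetD_set_self' _ _ _ _ (by rw [ihl]; omega), ihv t (by omega), pvC_succ x t (by omega)]
      · rw [pvGetD_set_ne' _ _ _ _ _ hne, ihv m (by omega)]

theorem cumsumA_getD (x : List Int) (m : Nat) (hm : m ≤ x.length) :
    (cumsumA x).getD m 0 = pvC x m :=
  (cumsumA_inv x x.length le_rfl).2 m hm

theorem pvFoldAppendIf (P : Nat → Prop) [DecidablePred P] (f : Nat → Int) :
    ∀ (l : List Nat) (acc : List Int),
      l.foldl (fun c k => if P k then c ++ [f k] else c) acc
        = acc ++ (l.filter (fun k => decide (P k))).map f := by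
  intro l
  induction l with
  | nil => intro acc; simp
  | cons x t ih =>
    intro acc
    simp only [List.foldl_cons, List.filter_cons]
    by_cases hx : P x
    · rw [if_pos hx, ih]; simp [hx]
    · rw [if_neg hx, ih]; simp [hx]
theorem pvABody_spec (n : Nat) (C : Nat → Int) (cumarr betarr : List Int)
    (cols : List (List Int)) (diag : List Int) (i : Nat)
    (st : List (List Int) × List (List Int)) (j : Nat)
    (h1 : 1 ≤ i) (hin : i < n) (hj : j < n)
    (hcum : ∀ m ≤ n, cumarr.getD m 0 = C m)
    (hL1 : st.1.length = n) (hL2 : st.2.length = n)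
    (hR1 : ∀ j' < n, (st.1.getD j' []).length = n)
    (hR2 : ∀ j' < n, (st.2.getD j' []).length = n)
    (hread1 : ∀ k < i, pvGet2 st.1 (i-1) k = pvKey C diag i k)
    (hread2 : ∀ k < i, pvGet2 st.2 (i-1) k = pvVal cols i k)
    (hz2 : pvGet2 st.2 j i = 0) :
    (pvABody cumarr betarr i st j).1.length = n ∧
    (pvABody cumarr betarr i st j).2.length = n ∧
    (∀ j' < n, ((pvABody cumarr betarr i st j).1.getD j' []).length = n) ∧
    (∀ j' < n, ((pvABody cumarr betarr i st j).2.getD j' []).length = n) ∧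
    (∀ j' i', j' ≠ j ∨ i' ≠ i →
      pvGet2 (pvABody cumarr betarr i st j).1 j' i' = pvGet2 st.1 j' i' ∧
      pvGet2 (pvABody cumarr betarr i st j).2 j' i' = pvGet2 st.2 j' i') ∧
    pvGet2 (pvABody cumarr betarr i st j).1 j i
      = (if j = i then pvDiagV C cols diag i else C (j+1) - C i) ∧
    pvGet2 (pvABody cumarr betarr i st j).2 j i = pvColV C betarr cols diag i j := by
  have hvC : cumarr.getD (j+1) 0 - cumarr.getD i 0 = C (j+1) - C i := by
    rw [hcum (j+1) (by omega), hcum i (by omega)]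
  unfold pvABody
  rw [if_neg (by omega : ¬ i = 0)]
  dsimp only
  set v := cumarr.getD (j+1) 0 - cumarr.getD i 0 with hvdef
  set dp' := pvSet2 st.1 j i v with hdp'
  have hdp'L : dp'.length = n := by rw [hdp', pvSet2_length, hL1]
  have hdp'R : ∀ j' < n, (dp'.getD j' []).length = n := by
    intro j' hj'; rw [hdp', pvSet2_rowlen]; exact hR1 j' hj'
  have hrk : ∀ k < i, pvGet2 dp' (i-1) k = pvKey C diag i k := by
    intro k hk
    rw [hdp', pvGet2_set2_ne _ _ _ _ _ _ (Or.inr (by omega))]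
    exact hread1 k hk
  have hcfold : (List.range i).foldl
      (fun c k => if pvGet2 dp' (i-1) k ≠ v then c ++ [pvGet2 st.2 (i-1) k] else c) []
      = ((List.range i).filter (fun k => decide (¬ pvKey C diag i k = v))).map (pvVal cols i) := by
    have hext : (List.range i).foldl
        (fun c k => if pvGet2 dp' (i-1) k ≠ v then c ++ [pvGet2 st.2 (i-1) k] else c) []
        = (List.range i).foldl
          (fun c k => if ¬ pvKey C diag i k = v then c ++ [pvVal cols i k] else c) [] := by
      apply List.foldl_ext
      intro b k hk
      rw [List.mem_range] at hk
      rw [hrk k hk, hread2 k hk]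
    rw [hext, pvFoldAppendIf (fun k => ¬ pvKey C diag i k = v) (pvVal cols i)]
    simp
  rw [hcfold]
  have hmax : PySem.List.max?
      (((List.range i).filter (fun k => decide (¬ pvKey C diag i k = v))).map (pvVal cols i))
      (fun y => y) = pvQ C cols diag i v := rfl
  by_cases hc : ((List.range i).filter (fun k => decide (¬ pvKey C diag i k = v))).map (pvVal cols i) = []
  · have hqnone : pvQ C cols diag i v = none := by
      rw [← hmax, PySem.List.max?_eq_none_iff]; exact hc
    rw [if_pos hc]
    by_cases hij : i = j
    · rw [if_pos hij]
      subst hij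
      have hget_v : pvGet2 dp' i i = v := by
        rw [hdp', pvGet2_set2_self _ _ _ _ (by omega) (by rw [hR1 i (by omega)]; omega)]
      have hget_d : pvGet2 dp' (i-1) (i-1) = diag.getD (i-1) 0 := by
        rw [hdp', pvGet2_set2_ne _ _ _ _ _ _ (Or.inr (by omega))]
        have := hread1 (i-1) (by omega)
        rw [this, pvKey, if_pos rfl]
      refine ⟨?_, ?_, ?_, ?_, ?_, ?_, ?_⟩
      · rw [pvSet2_length, hdp'L]
      · exact hL2
      · intro j' hj'; rw [pvSet2_rowlen]; exact hdp'R j' hj'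
      · exact hR2
      · intro j' i' hne
        constructor
        · rw [pvGet2_set2_ne _ _ _ _ _ _ hne, hdp', pvGet2_set2_ne _ _ _ _ _ _ hne]
        · rfl
      · rw [if_pos rfl, pvGet2_set2_self _ _ _ _ (by omega) (by rw [pvSet2_rowlen, hR1 i (by omega)]; omega)]
        rw [hget_v, hget_d, pvDiagV, if_pos (by rw [← hvC]; exact hqnone), ← hvC]
      · rw [hz2, pvColV]
        rw [show C (i+1) - C i = v from (by rw [hvC]), hqnone]
    · rw [if_neg hij]
      refine ⟨hdp'L, hL2, hdp'R, hR2, ?_, ?_, ?_⟩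
      · intro j' i' hne
        exact ⟨by rw [hdp', pvGet2_set2_ne _ _ _ _ _ _ hne], rfl⟩
      · rw [if_neg (by omega), hdp', pvGet2_set2_self _ _ _ _ (by omega) (by rw [hR1 j hj]; omega), hvC]
      · rw [hz2, pvColV, show C (j+1) - C i = v from hvC.symm, hqnone]
  · rw [if_neg hc]
    have hqsome : pvQ C cols diag i v ≠ none := by
      rw [← hmax]
      intro hnone
      rw [PySem.List.max?_eq_none_iff] at hnone
      exact hc hnone
    obtain ⟨mv, hmv⟩ : ∃ mv, pvQ C cols diag i v = some mv := by
      cases h : pvQ C cols diag i v with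
      | none => exact absurd h hqsome
      | some m => exact ⟨m, rfl⟩
    refine ⟨hdp'L, ?_, hdp'R, ?_, ?_, ?_, ?_⟩
    · rw [pvSet2_length, hL2]
    · intro j' hj'; rw [pvSet2_rowlen]; exact hR2 j' hj'
    · intro j' i' hne
      exact ⟨by rw [hdp', pvGet2_set2_ne _ _ _ _ _ _ hne], by rw [pvGet2_set2_ne _ _ _ _ _ _ hne]⟩
    · rw [hdp', pvGet2_set2_self _ _ _ _ (by omega) (by rw [hR1 j hj]; omega), hvC]
      by_cases hji : j = i
      · subst hji
        rw [if_pos rfl, pvDiagV, if_neg (by rw [← hvC]; exact hqsome)]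
      · rw [if_neg hji]
    · rw [pvGet2_set2_self _ _ _ _ (by omega) (by rw [hR2 j hj]; omega), hz2, hmax, hmv]
      rw [pvColV, show C (j+1) - C i = v from hvC.symm, hmv]
      simp
theorem pvGetD_rep (n j : Nat) (x : Int) (h : j < n) : (List.replicate n x).getD j 0 = x := by
  simp [List.getD_eq_getElem?_getD, h]
theorem pvGetD_append_left {α : Type} (l l' : List α) (m : Nat) (d : α) (h : m < l.length) :
    (l ++ l').getD m d = l.getD m d := by
  rw [List.getD_eq_getElem?_getD, List.getElem?_append_left h, ← List.getD_eq_getElem?_getD]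
theorem pvGetD_concat {α : Type} (l : List α) (x d : α) : (l ++ [x]).getD l.length d = x := by
  rw [List.getD_eq_getElem?_getD, List.getElem?_concat_length]; rfl
theorem pvGetD_map_range (f : Nat → Int) (n j : Nat) (h : j < n) :
    ((List.range n).map f).getD j 0 = f j := by
  rw [List.getD_eq_getElem?_getD, List.getElem?_map, List.getElem?_range h]; rfl

def pvOInv (n : Nat) (C : Nat → Int) (dp dp2 cols : List (List Int)) (diag : List Int) (i : Nat) : Prop :=
  dp.length = n ∧ dp2.length = n ∧
  (∀ j < n, (dp.getD j []).length = n) ∧ (∀ j < n, (dp2.getD j []).length = n) ∧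
  cols.length = i ∧ diag.length = i ∧
  (∀ i' < i, ∀ j < n, pvGet2 dp2 j i' = (cols.getD i' []).getD j 0) ∧
  (∀ i' < i, ∀ j < n, pvGet2 dp j i' = if j = i' then diag.getD i' 0 else C (j+1) - C i') ∧
  (∀ i', i ≤ i' → i' < n → ∀ j < n, pvGet2 dp j i' = 0 ∧ pvGet2 dp2 j i' = 0)

theorem pvInnerA_spec (n : Nat) (C : Nat → Int) (cumarr betarr : List Int)
    (dp dp2 cols : List (List Int)) (diag : List Int) (i : Nat)
    (h1 : 1 ≤ i) (hin : i < n) (hcum : ∀ m ≤ n, cumarr.getD m 0 = C m)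
    (hinv : pvOInv n C dp dp2 cols diag i) :
    (innerA n cumarr betarr i (dp, dp2)).1.length = n ∧
    (innerA n cumarr betarr i (dp, dp2)).2.length = n ∧
    (∀ j < n, ((innerA n cumarr betarr i (dp, dp2)).1.getD j []).length = n) ∧
    (∀ j < n, ((innerA n cumarr betarr i (dp, dp2)).2.getD j []).length = n) ∧
    (∀ i' < n, i' ≠ i → ∀ j < n,
      pvGet2 (innerA n cumarr betarr i (dp, dp2)).1 j i' = pvGet2 dp j i' ∧
      pvGet2 (innerA n cumarr betarr i (dp, dp2)).2 j i' = pvGet2 dp2 j i') ∧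
    (∀ j < n,
      pvGet2 (innerA n cumarr betarr i (dp, dp2)).1 j i
        = (if j = i then pvDiagV C cols diag i else C (j+1) - C i) ∧
      pvGet2 (innerA n cumarr betarr i (dp, dp2)).2 j i = pvColV C betarr cols diag i j) := by
  obtain ⟨hdL, hd2L, hdR, hd2R, hcolsL, hdiagL, hO7, hO8, hO9⟩ := hinv
  have hmain : ∀ m, m ≤ n →
      ((List.range m).foldl (pvABody cumarr betarr i) (dp, dp2)).1.length = n ∧
      ((List.range m).foldl (pvABody cumarr betarr i) (dp, dp2)).2.length = n ∧
      (∀ j < n, (((List.range m).foldl (pvABody cumarr betarr i) (dp, dp2)).1.getD j []).length = n) ∧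
      (∀ j < n, (((List.range m).foldl (pvABody cumarr betarr i) (dp, dp2)).2.getD j []).length = n) ∧
      (∀ i' < n, i' ≠ i → ∀ j < n,
        pvGet2 ((List.range m).foldl (pvABody cumarr betarr i) (dp, dp2)).1 j i' = pvGet2 dp j i' ∧
        pvGet2 ((List.range m).foldl (pvABody cumarr betarr i) (dp, dp2)).2 j i' = pvGet2 dp2 j i') ∧
      (∀ j < m,
        pvGet2 ((List.range m).foldl (pvABody cumarr betarr i) (dp, dp2)).1 j i
          = (if j = i then pvDiagV C cols diag i else C (j+1) - C i) ∧
        pvGet2 ((List.range m).foldl (pvABody cumarr betarr i) (dp, dp2)).2 j i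
          = pvColV C betarr cols diag i j) ∧
      (∀ j, m ≤ j → j < n →
        pvGet2 ((List.range m).foldl (pvABody cumarr betarr i) (dp, dp2)).1 j i = 0 ∧
        pvGet2 ((List.range m).foldl (pvABody cumarr betarr i) (dp, dp2)).2 j i = 0) := by
    intro m
    induction m with
    | zero =>
      intro _
      refine ⟨hdL, hd2L, hdR, hd2R, ?_, ?_, ?_⟩
      · intro i' _ _ j _; exact ⟨rfl, rfl⟩
      · intro j hj; omega
      · intro j _ hj; exact hO9 i le_rfl hin j hj
    | succ m ih =>
      intro hm
      obtain ⟨p1, p2, p3, p4, p5, p6, p7⟩ := ih (by omega)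
      rw [List.range_succ, List.foldl_append, List.foldl_cons, List.foldl_nil]
      set Sm := (List.range m).foldl (pvABody cumarr betarr i) (dp, dp2) with hSm
      have hread1 : ∀ k < i, pvGet2 Sm.1 (i-1) k = pvKey C diag i k := by
        intro k hk
        rw [(p5 k (by omega) (by omega) (i-1) (by omega)).1]
        rw [hO8 k hk (i-1) (by omega)]
        unfold pvKey
        rcases eq_or_ne k (i-1) with rfl | hne
        · rw [if_pos rfl, if_pos rfl]
        · rw [if_neg (by omega), if_neg hne]
          have : i - 1 + 1 = i := by omega
          rw [this]
      have hread2 : ∀ k < i, pvGet2 Sm.2 (i-1) k = pvVal cols i k := by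
        intro k hk
        rw [(p5 k (by omega) (by omega) (i-1) (by omega)).2]
        rw [hO7 k hk (i-1) (by omega)]
        rfl
      have hz2 : pvGet2 Sm.2 m i = 0 := (p7 m le_rfl (by omega)).2
      have hb := pvABody_spec n C cumarr betarr cols diag i Sm m h1 hin (by omega) hcum
        p1 p2 p3 p4 hread1 hread2 hz2
      obtain ⟨q1, q2, q3, q4, q5, q6, q7⟩ := hb
      refine ⟨q1, q2, q3, q4, ?_, ?_, ?_⟩
      · intro i' hi' hne j hj
        obtain ⟨e1, e2⟩ := q5 j i' (Or.inr hne)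
        obtain ⟨f1, f2⟩ := p5 i' hi' hne j hj
        exact ⟨e1.trans f1, e2.trans f2⟩
      · intro j hj
        rcases eq_or_ne j m with rfl | hne
        · exact ⟨q6, q7⟩
        · obtain ⟨e1, e2⟩ := q5 j i (Or.inl hne)
          obtain ⟨f1, f2⟩ := p6 j (by omega)
          exact ⟨e1.trans f1, e2.trans f2⟩
      · intro j hmj hj
        obtain ⟨e1, e2⟩ := q5 j i (Or.inl (by omega))
        obtain ⟨f1, f2⟩ := p7 j (by omega) hj
        exact ⟨e1.trans f1, e2.trans f2⟩
  have := hmain n le_rfl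
  obtain ⟨p1, p2, p3, p4, p5, p6, p7⟩ := this
  exact ⟨p1, p2, p3, p4, p5, fun j hj => p6 j hj⟩

theorem pvABody0_spec (n : Nat) (C : Nat → Int) (cumarr betarr : List Int)
    (st : List (List Int) × List (List Int)) (j : Nat) (hj : j < n)
    (hcum : ∀ m ≤ n, cumarr.getD m 0 = C m)
    (hL1 : st.1.length = n) (hL2 : st.2.length = n)
    (hR1 : ∀ j' < n, (st.1.getD j' []).length = n)
    (hR2 : ∀ j' < n, (st.2.getD j' []).length = n) :
    (pvABody cumarr betarr 0 st j).1.length = n ∧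
    (pvABody cumarr betarr 0 st j).2.length = n ∧
    (∀ j' < n, ((pvABody cumarr betarr 0 st j).1.getD j' []).length = n) ∧
    (∀ j' < n, ((pvABody cumarr betarr 0 st j).2.getD j' []).length = n) ∧
    (∀ j' i', j' ≠ j ∨ i' ≠ 0 →
      pvGet2 (pvABody cumarr betarr 0 st j).1 j' i' = pvGet2 st.1 j' i' ∧
      pvGet2 (pvABody cumarr betarr 0 st j).2 j' i' = pvGet2 st.2 j' i') ∧
    pvGet2 (pvABody cumarr betarr 0 st j).1 j 0 = C (j+1) - C 0 ∧
    pvGet2 (pvABody cumarr betarr 0 st j).2 j 0 = 0 := by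
  unfold pvABody
  rw [if_pos rfl]
  dsimp only
  refine ⟨?_, ?_, ?_, ?_, ?_, ?_, ?_⟩
  · rw [pvSet2_length, hL1]
  · rw [pvSet2_length, hL2]
  · intro j' hj'; rw [pvSet2_rowlen]; exact hR1 j' hj'
  · intro j' hj'; rw [pvSet2_rowlen]; exact hR2 j' hj'
  · intro j' i' hne
    exact ⟨by rw [pvGet2_set2_ne _ _ _ _ _ _ hne], by rw [pvGet2_set2_ne _ _ _ _ _ _ hne]⟩
  · rw [pvGet2_set2_self _ _ _ _ (by omega) (by rw [hR1 j hj]; omega)]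
    rw [hcum (j+1) (by omega), hcum 0 (by omega)]
  · rw [pvGet2_set2_self _ _ _ _ (by omega) (by rw [hR2 j hj]; omega)]
theorem pvInnerA0_spec (n : Nat) (C : Nat → Int) (cumarr betarr : List Int)
    (dp dp2 : List (List Int)) (hcum : ∀ m ≤ n, cumarr.getD m 0 = C m)
    (hL1 : dp.length = n) (hL2 : dp2.length = n)
    (hR1 : ∀ j < n, (dp.getD j []).length = n)
    (hR2 : ∀ j < n, (dp2.getD j []).length = n)
    (hz : ∀ i' < n, ∀ j < n, pvGet2 dp j i' = 0 ∧ pvGet2 dp2 j i' = 0) :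
    (innerA n cumarr betarr 0 (dp, dp2)).1.length = n ∧
    (innerA n cumarr betarr 0 (dp, dp2)).2.length = n ∧
    (∀ j < n, ((innerA n cumarr betarr 0 (dp, dp2)).1.getD j []).length = n) ∧
    (∀ j < n, ((innerA n cumarr betarr 0 (dp, dp2)).2.getD j []).length = n) ∧
    (∀ i' < n, i' ≠ 0 → ∀ j < n,
      pvGet2 (innerA n cumarr betarr 0 (dp, dp2)).1 j i' = 0 ∧
      pvGet2 (innerA n cumarr betarr 0 (dp, dp2)).2 j i' = 0) ∧
    (∀ j < n,
      pvGet2 (innerA n cumarr betarr 0 (dp, dp2)).1 j 0 = C (j+1) - C 0 ∧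
      pvGet2 (innerA n cumarr betarr 0 (dp, dp2)).2 j 0 = 0) := by
  have hmain : ∀ m, m ≤ n →
      ((List.range m).foldl (pvABody cumarr betarr 0) (dp, dp2)).1.length = n ∧
      ((List.range m).foldl (pvABody cumarr betarr 0) (dp, dp2)).2.length = n ∧
      (∀ j < n, (((List.range m).foldl (pvABody cumarr betarr 0) (dp, dp2)).1.getD j []).length = n) ∧
      (∀ j < n, (((List.range m).foldl (pvABody cumarr betarr 0) (dp, dp2)).2.getD j []).length = n) ∧
      (∀ i' < n, i' ≠ 0 → ∀ j < n,
        pvGet2 ((List.range m).foldl (pvABody cumarr betarr 0) (dp, dp2)).1 j i' = 0 ∧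
        pvGet2 ((List.range m).foldl (pvABody cumarr betarr 0) (dp, dp2)).2 j i' = 0) ∧
      (∀ j < m,
        pvGet2 ((List.range m).foldl (pvABody cumarr betarr 0) (dp, dp2)).1 j 0 = C (j+1) - C 0 ∧
        pvGet2 ((List.range m).foldl (pvABody cumarr betarr 0) (dp, dp2)).2 j 0 = 0) := by
    intro m
    induction m with
    | zero =>
      intro _
      refine ⟨hL1, hL2, hR1, hR2, ?_, ?_⟩
      · intro i' hi' _ j hj; exact hz i' hi' j hj
      · intro j hj; omega
    | succ m ih =>
      intro hm
      obtain ⟨p1, p2, p3, p4, p5, p6⟩ := ih (by omega)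
      rw [List.range_succ, List.foldl_append, List.foldl_cons, List.foldl_nil]
      set Sm := (List.range m).foldl (pvABody cumarr betarr 0) (dp, dp2) with hSm
      have hb := pvABody0_spec n C cumarr betarr Sm m (by omega) hcum p1 p2 p3 p4
      obtain ⟨q1, q2, q3, q4, q5, q6, q7⟩ := hb
      refine ⟨q1, q2, q3, q4, ?_, ?_⟩
      · intro i' hi' hne j hj
        obtain ⟨e1, e2⟩ := q5 j i' (Or.inr hne)
        obtain ⟨f1, f2⟩ := p5 i' hi' hne j hj
        exact ⟨e1.trans f1, e2.trans f2⟩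
      · intro j hj
        rcases eq_or_ne j m with rfl | hne
        · exact ⟨q6, q7⟩
        · obtain ⟨e1, e2⟩ := q5 j 0 (Or.inl hne)
          obtain ⟨f1, f2⟩ := p6 j (by omega)
          exact ⟨e1.trans f1, e2.trans f2⟩
  have := hmain n le_rfl
  obtain ⟨p1, p2, p3, p4, p5, p6⟩ := this
  exact ⟨p1, p2, p3, p4, p5, fun j hj => p6 j hj⟩
theorem pvGetD_rep' (n : Nat) (x : List Int) (j : Nat) (h : j < n) :
    (List.replicate n x).getD j [] = x := by
  simp [List.getD_eq_getElem?_getD, h]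

theorem pvOuter_spec (n : Nat) (C : Nat → Int) (cumarr cum betarr : List Int) (hn : 0 < n)
    (hcumA : ∀ m ≤ n, cumarr.getD m 0 = C m) (hcumB : ∀ m ≤ n, cum.getD m 0 = C m) :
    ∀ i, i ≤ n →
      pvOInv n C
        ((List.range i).foldl (fun st i' => innerA n cumarr betarr i' st)
          (List.replicate n (List.replicate n 0), List.replicate n (List.replicate n 0))).1
        ((List.range i).foldl (fun st i' => innerA n cumarr betarr i' st)
          (List.replicate n (List.replicate n 0), List.replicate n (List.replicate n 0))).2
        ((List.range i).foldl (fun st i' => pvColB n cum betarr i' st) ([], [])).1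
        ((List.range i).foldl (fun st i' => pvColB n cum betarr i' st) ([], [])).2 i := by
  intro i
  induction i with
  | zero =>
    intro _
    simp only [List.range_zero, List.foldl_nil]
    refine ⟨by simp, by simp, ?_, ?_, rfl, rfl, ?_, ?_, ?_⟩
    · intro j hj
      rw [pvGetD_rep' n (List.replicate n (0:Int)) j hj]
      simp
    · intro j hj
      rw [pvGetD_rep' n (List.replicate n (0:Int)) j hj]
      simp
    · intro i' hi'; omega
    · intro i' hi'; omega
    · intro i' _ hi' j hj
      unfold pvGet2
      rw [pvGetD_rep' n (List.replicate n (0:Int)) j hj, pvGetD_rep n i' 0 hi']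
      exact ⟨rfl, rfl⟩
  | succ i ih =>
    intro hi
    have hOi := ih (by omega)
    simp only [List.range_succ, List.foldl_append, List.foldl_cons, List.foldl_nil]
    set stA := (List.range i).foldl (fun st i' => innerA n cumarr betarr i' st)
      (List.replicate n (List.replicate n 0), List.replicate n (List.replicate n 0)) with hstA
    set stB := (List.range i).foldl (fun st i' => pvColB n cum betarr i' st) ([], []) with hstB
    obtain ⟨hdL, hd2L, hdR, hd2R, hcolsL, hdiagL, hO7, hO8, hO9⟩ := hOi
    rcases Nat.eq_zero_or_pos i with rfl | hipos
    · -- column 0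
      have hcolsNil : stB.1 = [] := List.eq_nil_of_length_eq_zero hcolsL
      have hdiagNil : stB.2 = [] := List.eq_nil_of_length_eq_zero hdiagL
      have hA0 := pvInnerA0_spec n C cumarr betarr stA.1 stA.2 hcumA hdL hd2L hdR hd2R
        (fun i' hi' j hj => hO9 i' (by omega) hi' j hj)
      obtain ⟨q1, q2, q3, q4, q5, q6⟩ := hA0
      have hB0 : pvColB n cum betarr 0 (stB.1, stB.2) =
          (stB.1 ++ [List.replicate n 0], stB.2 ++ [cum.getD 1 0 - cum.getD 0 0]) := by
        unfold pvColB
        rw [if_pos rfl]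
      rw [show (stB.1, stB.2) = stB from rfl] at hB0
      rw [show innerA n cumarr betarr 0 stA = innerA n cumarr betarr 0 (stA.1, stA.2) from rfl]
      rw [hB0, hcolsNil, hdiagNil]
      simp only [List.nil_append]
      refine ⟨q1, q2, q3, q4, by simp, by simp, ?_, ?_, ?_⟩
      · intro i' hi' j hj
        have : i' = 0 := by omega
        subst this
        rw [(q6 j hj).2]
        rw [show ([List.replicate n (0:Int)] : List (List Int)).getD 0 [] = List.replicate n 0 from rfl]
        rw [pvGetD_rep n j 0 hj]
      · intro i' hi' j hj
        have : i' = 0 := by omega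
        subst this
        rw [(q6 j hj).1]
        rw [show ([cum.getD 1 0 - cum.getD 0 0] : List Int).getD 0 0 = cum.getD 1 0 - cum.getD 0 0 from rfl]
        rw [hcumB 1 (by omega), hcumB 0 (by omega)]
        rcases eq_or_ne j 0 with rfl | hne
        · rw [if_pos rfl]
        · rw [if_neg hne]
      · intro i' hii' hi'n j hj
        exact (q5 i' hi'n (by omega) j hj)
    · -- column i ≥ 1
      have hA := pvInnerA_spec n C cumarr betarr stA.1 stA.2 stB.1 stB.2 i hipos (by omega) hcumA
        ⟨hdL, hd2L, hdR, hd2R, hcolsL, hdiagL, hO7, hO8, hO9⟩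
      obtain ⟨q1, q2, q3, q4, q5, q6⟩ := hA
      have hB := pvColB_spec n C cum betarr stB.1 stB.2 i hipos (by omega) hcumB
      rw [show (stB.1, stB.2) = stB from rfl] at hB
      rw [show innerA n cumarr betarr i stA = innerA n cumarr betarr i (stA.1, stA.2) from rfl]
      rw [hB]
      refine ⟨q1, q2, q3, q4, by simp [hcolsL], by simp [hdiagL], ?_, ?_, ?_⟩
      · intro i' hi' j hj
        rcases eq_or_ne i' i with rfl | hne
        · rw [(q6 j hj).2]
          dsimp only
          rw [← hcolsL, pvGetD_concat]
          rw [pvGetD_map_range _ n j hj]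
        · obtain ⟨e1, e2⟩ := q5 i' (by omega) hne j hj
          rw [e2, hO7 i' (by omega) j hj]
          dsimp only
          rw [pvGetD_append_left _ _ _ _ (by omega)]
      · intro i' hi' j hj
        rcases eq_or_ne i' i with rfl | hne
        · rw [(q6 j hj).1]
          dsimp only
          rw [← hdiagL, pvGetD_concat]
        · obtain ⟨e1, e2⟩ := q5 i' (by omega) hne j hj
          rw [e1, hO8 i' (by omega) j hj]
          dsimp only
          rw [pvGetD_append_left _ _ _ _ (by omega)]
      · intro i' hii' hi'n j hj
        obtain ⟨e1, e2⟩ := q5 i' hi'n (by omega) j hj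
        obtain ⟨f1, f2⟩ := hO9 i' (by omega) hi'n j hj
        exact ⟨e1.trans f1, e2.trans f2⟩


-- ===== VERDICT (by name: the statement is the Claim_ definition above) =====
theorem calcmax_spec : Claim_equal_calcmax := by
  intro length numarr betarr _ hpre
  obtain ⟨hp1, hp2, hp3⟩ := hpre
  unfold Spec_calcmax calcmax calcmax_alt
  dsimp only
  set n := length.toNat with hn
  have hn1 : 0 < n := by omega
  have hnlen : n ≤ numarr.length := by omega
  have hcumA : ∀ m ≤ n, (cumsumA numarr).getD m 0 = pvC numarr m :=
    fun m hm => cumsumA_getD numarr m (by omega)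
  have hslice : PySem.List.slice numarr none (some length) = numarr.take n := by
    rw [PySem.List.slice_to numarr (by omega : (0:Int) ≤ length)]
  have hcumB : ∀ m ≤ n,
      ((PySem.List.slice numarr none (some length)).foldl
        (fun c x => c ++ [c.getLastD 0 + x]) [(0 : Int)]).getD m 0 = pvC numarr m := by
    intro m hm
    rw [hslice, cumB_getD' (numarr.take n) 0 m (by rw [List.length_take]; omega)]
    unfold pvC
    rw [List.take_take, Nat.min_eq_left hm]
    omega
  have hO := pvOuter_spec n (pvC numarr)
    (cumsumA numarr)
    ((PySem.List.slice numarr none (some length)).foldl (fun c x => c ++ [c.getLastD 0 + x]) [(0 : Int)])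
    betarr hn1 hcumA hcumB n le_rfl
  obtain ⟨hdL, hd2L, hdR, hd2R, hcolsL, hdiagL, hO7, hO8, hO9⟩ := hO
  set stA := (List.range n).foldl (fun st i => innerA n (cumsumA numarr) betarr i st)
    (List.replicate n (List.replicate n 0), List.replicate n (List.replicate n 0)) with hstA
  set stB := (List.range n).foldl (fun st i => pvColB n
    ((PySem.List.slice numarr none (some length)).foldl (fun c x => c ++ [c.getLastD 0 + x]) [(0 : Int)])
    betarr i st) ([], []) with hstB
  have hrowlen : (stA.2.getD (n-1) []).length = n := hd2R (n-1) (by omega)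
  have hlists : stA.2.getD (n-1) [] = stB.1.map (fun c => c.getD (n-1) 0) := by
    apply List.ext_getElem (by rw [hrowlen, List.length_map, hcolsL])
    intro idx h1 h2
    have hidx : idx < n := by rw [hrowlen] at h1; exact h1
    have e1 : (stA.2.getD (n-1) [])[idx] = pvGet2 stA.2 (n-1) idx := by
      rw [← List.getD_eq_getElem _ 0 h1]
      rfl
    have e2 : (stB.1.map (fun c => c.getD (n-1) 0))[idx] = (stB.1.getD idx []).getD (n-1) 0 := by
      rw [List.getElem_map]
      congr 1
      rw [← List.getD_eq_getElem stB.1 [] (by rw [hcolsL]; exact hidx)]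
    rw [e1, e2]
    exact hO7 idx hidx (n-1) (by omega)
  rw [hlists]
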